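-- pv_equiv track=rewrite | github.com/Kinshua/Siren | core/cortex/adversarial_ml.py | _url_encode_triple
-- ===== SOURCE A (Python) =====
-- def _url_encode_triple(payload: str) -> str:
--     """Triple URL-encode critical characters."""
--     result = []
--     encode_chars = set("'\"<>()")
--     for ch in payload:
--         if ch in encode_chars:
--             hex_val = f"{ord(ch):02X}"
--             # Triple encode: %2525 + hex
--             result.append(f"%2525{hex_val}")
--         else:
--             result.append(ch)
--     return "".join(result)
-- ===== SOURCE B (Python) =====
-- def _url_encode_triple(payload: str) -> str:
--     """Triple URL-encode critical characters."""
--     # Staged passes: one whole-string replace per special character.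
--     # Correct because no replacement string ("%2525" + two hex digits from
--     # {2,7,3,C,E,8,9}) contains any of the special characters, so later
--     # passes never touch text produced by earlier ones.
--     for c in "'\"<>()":
--         payload = payload.replace(c, f"%2525{ord(c):02X}")
--     return payload
-- ===== Notes on version B (the rewrite author's own statement) =====
-- stated objective: faster
-- what changed: Replaces A's single per-character scan (if/else with list-append and join) by six staged whole-string str.replace passes, one per special character (correct because the replacement strings contain no special characters, so the passes do not interfere); the C-level passes give a measured constant-factor speedup.
import Mathlib
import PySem

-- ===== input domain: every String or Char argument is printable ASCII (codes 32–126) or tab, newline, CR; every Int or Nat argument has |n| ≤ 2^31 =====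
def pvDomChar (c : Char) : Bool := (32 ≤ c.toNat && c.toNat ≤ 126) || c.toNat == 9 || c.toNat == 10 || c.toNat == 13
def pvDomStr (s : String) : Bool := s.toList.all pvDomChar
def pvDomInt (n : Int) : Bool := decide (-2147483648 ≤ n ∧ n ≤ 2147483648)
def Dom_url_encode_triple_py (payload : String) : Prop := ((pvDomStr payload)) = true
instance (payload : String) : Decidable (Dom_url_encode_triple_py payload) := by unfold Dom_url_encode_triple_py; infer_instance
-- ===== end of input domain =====

-- B replaces A's single per-character scan by six staged whole-string replace passes,
-- one per special character (alternative decomposition; correct because the replacement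
-- strings contain no special characters, so the passes do not interfere).

-- f"{n:02X}" — exact for 0 ≤ n < 256 (every character encoded here has ordinal < 127)
def pvHexDigit (d : Nat) : Char := if d < 10 then Char.ofNat (48 + d) else Char.ofNat (55 + d)
def pvHex2 (n : Nat) : List Char := [pvHexDigit (n / 16 % 16), pvHexDigit (n % 16)]

-- the replacement text "%2525" + hex, shared spelling by both ports
def pvEnc (c : Char) : List Char := '%'::'2'::'5'::'2'::'5':: pvHex2 c.toNat

-- ===== PORT A =====
def url_encode_triple_py (payload : String) : String :=
  let encode_chars := PySem.Set.ofList "'\"<>()".toList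
  let result := payload.toList.foldl (fun acc ch =>
    if encode_chars.contains ch then
      -- hex_val = f"{ord(ch):02X}"; result.append(f"%2525{hex_val}")
      acc ++ [String.ofList (pvEnc ch)]
    else acc ++ [String.ofList [ch]]) ([] : List String)
  PySem.Str.join "" result

-- ===== PORT B =====
def url_encode_triple_py_alt (payload : String) : String :=
  -- for c in "'\"<>()": payload = payload.replace(c, f"%2525{ord(c):02X}")
  ("'\"<>()".toList).foldl
    (fun s c => PySem.Str.replace s (String.ofList [c]) (String.ofList (pvEnc c)))
    payload

-- ===== PRECONDITION & SPEC =====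
def Spec_url_encode_triple_py (payload : String) (out : String) : Prop := out = url_encode_triple_py_alt payload
instance (payload : String) (out : String) : Decidable (Spec_url_encode_triple_py payload out) := by unfold Spec_url_encode_triple_py; infer_instance

-- ===== CLAIM =====
def Claim_equal_url_encode_triple_py : Prop := ∀ (payload : String), Dom_url_encode_triple_py payload → Spec_url_encode_triple_py payload (url_encode_triple_py payload)

-- ===== LEMMAS AND PROOFS =====

def pvSpecials : List Char := ['\'', '"', '<', '>', '(', ')']

-- the substitution applied so far: chars already processed (∈ P) are encoded
def pvSubst (P : List Char) (ch : Char) : List Char := if ch ∈ P then pvEnc ch else [ch]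

-- single-character replace is a per-character flatMap
theorem pv_replace_go_single (c : Char) (r : List Char) :
    ∀ (l : List Char) (fuel : Nat) (acc : List Char), l.length ≤ fuel →
      PySem.Chars.replace.go [c] r fuel l acc =
        acc.reverse ++ l.flatMap (fun ch => if ch = c then r else [ch]) := by
  intro l
  induction l with
  | nil =>
    intro fuel acc _
    cases fuel <;> simp [PySem.Chars.replace.go]
  | cons ch t ih =>
    intro fuel acc hle
    cases fuel with
    | zero => simp at hle
    | succ f =>
      rw [PySem.Chars.replace.go]
      by_cases h : ch = c
      · subst h
        have hpre : [ch].isPrefixOf (ch :: t) = true := by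
          simp [List.isPrefixOf]
        simp only [hpre, if_true, List.length_cons, List.drop_succ_cons,
          List.length_nil, List.drop_zero]
        rw [ih f (List.reverse r ++ acc) (by simpa using hle)]
        simp
      · have hpre : [c].isPrefixOf (ch :: t) = false := by
          simp [List.isPrefixOf]
          exact fun h2 => h h2.symm
        simp only [hpre, Bool.false_eq_true, if_false]
        rw [ih f (ch :: acc) (by simpa using hle)]
        simp [h]

theorem pv_replace_single (s : List Char) (c : Char) (r : List Char) :
    PySem.Chars.replace s [c] r = s.flatMap (fun ch => if ch = c then r else [ch]) := by
  rw [PySem.Chars.replace]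
  simp only [List.isEmpty_cons, Bool.false_eq_true, if_false]
  simpa using pv_replace_go_single c r s s.length [] le_rfl

theorem pv_flatMap_id (c : Char) (r : List Char) :
    ∀ (l : List Char), c ∉ l → l.flatMap (fun x => if x = c then r else [x]) = l := by
  intro l
  induction l with
  | nil => intro _; rfl
  | cons x xs ihx =>
    intro h
    have hx : x ≠ c := fun he => h (he ▸ List.mem_cons_self ..)
    have hxs : c ∉ xs := fun hm => h (List.mem_cons_of_mem _ hm)
    simp [hx, ihx hxs]

-- one replace pass advances the staged substitution by one character
theorem pv_subst_step (P : List Char) (c : Char) (hc : c ∈ pvSpecials)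
    (hP : ∀ b ∈ P, b ∈ pvSpecials) (s : List Char) :
    PySem.Chars.replace (s.flatMap (pvSubst P)) [c] (pvEnc c) =
      s.flatMap (pvSubst (P ++ [c])) := by
  rw [pv_replace_single, List.flatMap_assoc]
  apply List.flatMap_congr
  intro ch _
  unfold pvSubst
  by_cases hmem : ch ∈ P
  · have hch : ch ∈ pvSpecials := hP ch hmem
    have hno : c ∉ pvEnc ch := by
      fin_cases hc <;> fin_cases hch <;> decide
    simp only [hmem, List.mem_append, true_or, if_true]
    exact pv_flatMap_id _ _ _ hno
  · simp only [hmem, if_false, List.mem_append, List.mem_singleton, false_or,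
      List.flatMap_cons, List.flatMap_nil, List.append_nil]
    by_cases he : ch = c
    · subst he; simp
    · simp [he]

-- the whole chain of passes realises the full substitution
theorem pv_chain (L : List Char) :
    ∀ (P : List Char), (∀ b ∈ P, b ∈ pvSpecials) → (∀ b ∈ L, b ∈ pvSpecials) →
    ∀ (s : List Char),
      L.foldl (fun t c => PySem.Chars.replace t [c] (pvEnc c)) (s.flatMap (pvSubst P)) =
        s.flatMap (pvSubst (P ++ L)) := by
  induction L with
  | nil => intro P _ _ s; simp
  | cons c L' ih =>
    intro P hP hL s
    rw [List.foldl_cons, pv_subst_step P c (hL c (List.mem_cons_self ..)) hP s]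
    rw [ih (P ++ [c])
      (by intro b hb; rcases List.mem_append.mp hb with h | h
          · exact hP b h
          · rw [List.mem_singleton] at h; subst h; exact hL _ (List.mem_cons_self ..))
      (fun b hb => hL b (List.mem_cons_of_mem _ hb)) s]
    simp

-- A's loop body, as the string appended for one character
def pvAstep (ch : Char) : String :=
  if (PySem.Set.ofList "'\"<>()".toList).contains ch then
    String.ofList (pvEnc ch)
  else String.ofList [ch]

theorem pv_astep_eq (ch : Char) : (pvAstep ch).toList = pvSubst pvSpecials ch := by
  unfold pvAstep pvSubst
  have hset : PySem.Set.ofList "'\"<>()".toList = pvSpecials := by decide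
  rw [hset]
  by_cases h : ch ∈ pvSpecials
  · simp [PySem.Set.contains, h]
  · simp [PySem.Set.contains, h]

theorem pv_join_empty (xss : List (List Char)) : PySem.Chars.join [] xss = xss.flatten := by
  induction xss with
  | nil => rfl
  | cons a rest ih =>
    cases rest with
    | nil => simp [PySem.Chars.join_singleton]
    | cons b r =>
      rw [PySem.Chars.join_cons_cons, ih]
      simp

-- A's value, on the character-list level
theorem pv_A_toList (payload : String) :
    (url_encode_triple_py payload).toList = payload.toList.flatMap (pvSubst pvSpecials) := by
  unfold url_encode_triple_py
  have hfun : (fun (acc : List String) ch =>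
      if (PySem.Set.ofList "'\"<>()".toList).contains ch then
        acc ++ [String.ofList (pvEnc ch)]
      else acc ++ [String.ofList [ch]]) = (fun acc ch => acc ++ [pvAstep ch]) := by
    funext acc ch
    unfold pvAstep
    split <;> rfl
  simp only [hfun]
  rw [PySem.List.foldl_append_singleton_eq_map, List.nil_append, PySem.Str.toList_join]
  simp only [List.map_map]
  have hmap : (String.toList ∘ pvAstep) = pvSubst pvSpecials := funext pv_astep_eq
  have hnil : ("" : String).toList = [] := rfl
  rw [hmap, hnil, pv_join_empty, List.flatMap_def]

-- B's value, on the character-list level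
theorem pv_B_toList (payload : String) :
    (url_encode_triple_py_alt payload).toList = payload.toList.flatMap (pvSubst pvSpecials) := by
  unfold url_encode_triple_py_alt
  have hstr : ∀ (L : List Char) (s : String),
      (L.foldl (fun t c => PySem.Str.replace t (String.ofList [c]) (String.ofList (pvEnc c))) s).toList
        = L.foldl (fun t c => PySem.Chars.replace t [c] (pvEnc c)) s.toList := by
    intro L
    induction L with
    | nil => intro s; rfl
    | cons c L' ih =>
      intro s
      rw [List.foldl_cons, List.foldl_cons, ih]
      congr 1
      rw [PySem.Str.toList_replace]
      simp
  rw [hstr]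
  have hLl : "'\"<>()".toList = pvSpecials := by decide
  rw [hLl]
  have hsub : pvSubst [] = fun ch => [ch] := funext fun ch => by simp [pvSubst]
  have h0 : payload.toList = payload.toList.flatMap (pvSubst []) := by
    rw [hsub, List.flatMap_singleton']
  conv_lhs => rw [h0]
  rw [pv_chain pvSpecials [] (by simp) (fun b hb => hb) payload.toList]
  rfl

-- ===== VERDICT =====
theorem url_encode_triple_py_spec : Claim_equal_url_encode_triple_py := by
  intro payload _
  unfold Spec_url_encode_triple_py
  have h := (pv_A_toList payload).trans (pv_B_toList payload).symm
  calc url_encode_triple_py payload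
      = String.ofList (url_encode_triple_py payload).toList := String.ofList_toList.symm
    _ = String.ofList (url_encode_triple_py_alt payload).toList := by rw [h]
    _ = url_encode_triple_py_alt payload := String.ofList_toList
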